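-- pv_equiv track=rewrite | github.com/wyk18703232953/myResearch | codeComplex/demo/filteredData/python/logn/results_python_logn_0408/python_logn_0408.py | getUpper
-- ===== SOURCE A (Python) =====
-- MAXN = 10**18 + 10
--
-- def getUpper(N):
--     z = 1
--     r = 0
--     for _ in range(N):
--         r += z
--         z *= 4
--         if r > MAXN:
--             break
--     return r
-- ===== SOURCE B (Python) =====
-- MAXN = 10**18 + 10
--
-- def getUpper(N):
--     # closed form: sum of first k powers of 4 is (4**k - 1) // 3;
--     # the loop breaks at the smallest m with 4**m > 3*MAXN + 1
--     if N <= 0: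
--         return 0
--     t = 3 * MAXN + 1
--     m = (t.bit_length() + 1) // 2
--     k = m if m <= N else N
--     return (4 ** k - 1) // 3
-- ===== Notes on version B (the rewrite author's own statement) =====
-- stated objective: alternative
-- what changed: Replaced the accumulation loop by the geometric closed form (4**k-1)//3, with the break index computed arithmetically from bit_length of 3*MAXN+1 instead of iterating.
import Mathlib
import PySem

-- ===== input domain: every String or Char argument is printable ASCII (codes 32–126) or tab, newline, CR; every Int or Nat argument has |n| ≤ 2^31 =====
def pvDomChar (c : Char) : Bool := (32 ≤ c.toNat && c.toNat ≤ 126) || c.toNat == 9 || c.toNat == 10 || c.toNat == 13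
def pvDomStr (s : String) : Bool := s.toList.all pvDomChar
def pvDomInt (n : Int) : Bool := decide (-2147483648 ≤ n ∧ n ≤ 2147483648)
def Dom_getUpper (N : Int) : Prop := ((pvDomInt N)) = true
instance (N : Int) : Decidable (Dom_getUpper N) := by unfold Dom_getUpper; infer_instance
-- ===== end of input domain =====

-- B replaces A's accumulation loop by the geometric closed form (4^k-1)//3 with the break
-- index computed from bit_length, a constant-time computation instead of the loop.

-- ===== PORT A =====
def pyMAXN : Int := 10 ^ 18 + 10

-- the 'for _ in range(N)' loop with break; the counter is the number of remaining iterations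
def getUpperLoop : Nat → Int → Int → Int
  | 0, _, r => r
  | n + 1, z, r =>
      let r' := r + z
      let z' := z * 4
      if r' > pyMAXN then r' else getUpperLoop n z' r'

def getUpper (N : Int) : Int := getUpperLoop N.toNat 1 0

-- ===== PORT B =====
def getUpper_alt (N : Int) : Int :=
  if N ≤ 0 then 0
  else
    let t : Int := 3 * pyMAXN + 1
    let m : Int := PySem.Int.floordiv ((PySem.Int.bitLength t : Int) + 1) 2
    let k : Int := if m ≤ N then m else N
    PySem.Int.floordiv (4 ^ k.toNat - 1) 3

-- ===== PRECONDITION & SPEC =====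
def Spec_getUpper (N : Int) (out : Int) : Prop := out = getUpper_alt N
instance (N : Int) (out : Int) : Decidable (Spec_getUpper N out) := by unfold Spec_getUpper; infer_instance

-- ===== CLAIM (what is proved, stated in full; the proofs are below) =====
def Claim_equal_getUpper : Prop := ∀ (N : Int), Dom_getUpper N → Spec_getUpper N (getUpper N)

-- ===== LEMMAS AND PROOFS =====

-- partial sums of powers of 4
def fpow : Nat → Int
  | 0 => 0
  | k + 1 => fpow k + 4 ^ k

lemma fpow_mono : Monotone fpow := by
  apply monotone_nat_of_le_succ
  intro n
  simp only [fpow]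
  have : (0:Int) ≤ 4 ^ n := by positivity
  omega

lemma fpow_le_maxn {j : Nat} (hj : j ≤ 30) : fpow j ≤ pyMAXN :=
  (fpow_mono hj).trans (by decide)

lemma fpow31_gt : fpow 31 > pyMAXN := by decide

lemma loop_char : ∀ (n k : Nat), k ≤ 30 →
    getUpperLoop n ((4 : Int) ^ k) (fpow k) = fpow (min (k + n) 31) := by
  intro n
  induction n with
  | zero =>
      intro k hk
      rw [Nat.add_zero, Nat.min_eq_left (by omega : k ≤ 31)]
      rfl
  | succ n ih =>
      intro k hk
      show (if fpow k + 4 ^ k > pyMAXN then fpow k + 4 ^ k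
            else getUpperLoop n ((4:Int) ^ k * 4) (fpow k + 4 ^ k)) = _
      have hstep : fpow k + (4 : Int) ^ k = fpow (k + 1) := by simp [fpow]
      rcases Nat.lt_or_ge k 30 with hk' | hk'
      · rw [if_neg (by rw [hstep]; exact not_lt.mpr (fpow_le_maxn (by omega)))]
        have hz : (4 : Int) ^ k * 4 = 4 ^ (k + 1) := by ring
        rw [hz, hstep, ih (k + 1) (by omega)]
        congr 1
        omega
      · have hk30 : k = 30 := by omega
        subst hk30
        rw [if_pos (by rw [hstep]; exact fpow31_gt)]
        rw [hstep]
        congr 1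
        omega

lemma three_mul_fpow (j : Nat) : 3 * fpow j = 4 ^ j - 1 := by
  induction j with
  | zero => simp [fpow]
  | succ j ih => simp only [fpow, pow_succ]; linarith

lemma closed_form (j : Nat) : PySem.Int.floordiv (4 ^ j - 1) 3 = fpow j := by
  rw [← three_mul_fpow, PySem.Int.floordiv_eq_ediv_of_pos (by norm_num)]
  exact Int.mul_ediv_cancel_left _ (by norm_num)

lemma m_eval : PySem.Int.floordiv ((PySem.Int.bitLength (3 * pyMAXN + 1) : Int) + 1) 2 = 31 := by
  decide

-- ===== VERDICT (by name: the statement is the Claim_ definition above) =====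
theorem getUpper_spec : Claim_equal_getUpper := by
  intro N _
  unfold Spec_getUpper getUpper getUpper_alt
  by_cases hN : N ≤ 0
  · rw [if_pos hN]
    have : N.toNat = 0 := by omega
    rw [this]
    rfl
  · rw [if_neg hN]
    have hA : getUpperLoop N.toNat 1 0 = fpow (min N.toNat 31) := by
      have := loop_char N.toNat 0 (by omega)
      simpa [fpow] using this
    rw [hA]
    simp only [m_eval]
    by_cases h31 : (31 : Int) ≤ N
    · rw [if_pos h31]
      rw [closed_form]
      congr 1
      omega
    · rw [if_neg (by omega)]
      rw [closed_form]
      congr 1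
      omega
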